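-- pv_equiv track=rewrite | github.com/YaleComputerSociety/MajorAudit | pipeline/analysis.py | filter_course_sections
-- ===== SOURCE A (Python) =====
-- from collections import defaultdict
--
-- def filter_course_sections(courses):
--     """
--     Filter a list of course objects to keep only one section per unique course
--     and remove cancelled courses.
--
--     Args:
--         courses (list): A list of course objects with section information
--
--     Returns:
--         list: A filtered list with only one section per course and no cancelled courses
--     """
--     # First, filter out cancelled courses
--     active_courses = [course for course in courses if course.get('extra_info') != "CANCELLED"]
--
--     # Group remaining courses by same_course_id
--     courses_by_same_id = defaultdict(list)
--     for course in active_courses: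
--         same_course_id = course.get('same_course_id')
--         courses_by_same_id[same_course_id].append(course)
--
--     # Define section priority order
--     section_priority = {
--         "1": 1, "2": 2, "3": 3, "4": 4, "5": 5,
--         "0": 10,  # Lower priority for section "0"
--         "A": 100, "B": 101, "C": 102, "D": 103, "E": 104,
--         "F": 105, "G": 106, "H": 107, "I": 108, "J": 109
--     }
--     default_priority = 1000
--
--     # Keep only the canonical section for each course
--     filtered_courses = []
--
--     for same_id, course_list in courses_by_same_id.items():
--         if len(course_list) == 1:
--             # Only one section, keep it
--             filtered_courses.append(course_list[0])
--             continue
--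
--         # Multiple sections, try to find section "1" first
--         section_1_course = None
--         for course in course_list:
--             if course.get('section') == "1":
--                 section_1_course = course
--                 break
--
--         if section_1_course:
--             filtered_courses.append(section_1_course)
--             continue
--
--         # If no section "1", use priority order
--         sorted_courses = sorted(
--             course_list,
--             key=lambda c: section_priority.get(c.get('section', ''), default_priority)
--         )
--
--         # Take the highest priority section
--         filtered_courses.append(sorted_courses[0])
--
--     return filtered_courses
-- ===== SOURCE B (Python) =====
-- def filter_course_sections(courses):
--     """Single-pass: keep, per same_course_id, the first course with minimal
--     section priority (section "1" has the global minimum), skipping cancelled."""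
--     priority = {
--         "1": 1, "2": 2, "3": 3, "4": 4, "5": 5,
--         "0": 10,
--         "A": 100, "B": 101, "C": 102, "D": 103, "E": 104,
--         "F": 105, "G": 106, "H": 107, "I": 108, "J": 109
--     }
--     best = {}
--     for course in courses:
--         if course.get('extra_info') == "CANCELLED":
--             continue
--         p = priority.get(course.get('section', ''), 1000)
--         k = course.get('same_course_id')
--         if k not in best or p < best[k][1]:
--             best[k] = (course, p)
--     return [c for c, _ in best.values()]
-- ===== Notes on version B (the rewrite author's own statement) =====
-- stated objective: simpler
-- what changed: Replaces A's three phases (group courses into per-id lists, then per group: len==1 shortcut, linear search for section "1", stable sort by priority) with a single pass that keeps, per same_course_id, the first course of strictly minimal section priority in an insertion-ordered dict, exploiting that section "1" has the globally minimal priority.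
import Mathlib
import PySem

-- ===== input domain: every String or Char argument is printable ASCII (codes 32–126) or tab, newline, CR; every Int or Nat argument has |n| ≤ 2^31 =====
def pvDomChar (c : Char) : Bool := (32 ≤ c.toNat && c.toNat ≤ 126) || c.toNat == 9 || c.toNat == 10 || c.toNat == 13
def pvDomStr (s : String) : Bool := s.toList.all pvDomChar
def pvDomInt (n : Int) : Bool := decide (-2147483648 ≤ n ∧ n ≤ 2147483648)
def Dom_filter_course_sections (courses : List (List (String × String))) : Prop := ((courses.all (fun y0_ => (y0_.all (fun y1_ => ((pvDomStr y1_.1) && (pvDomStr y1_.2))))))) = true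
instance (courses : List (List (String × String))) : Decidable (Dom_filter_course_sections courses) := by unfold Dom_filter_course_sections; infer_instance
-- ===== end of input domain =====

-- B replaces A's group-into-lists / section-"1" search / stable sort with one pass keeping,
-- per same_course_id, the first course of minimal section priority (objective: simpler).


-- ===== PORT A =====
-- course.get(key): first-match lookup in the course's association list
def cget (c : List (String × String)) (k : String) : Option String :=
  (PySem.Dict.mk c).get? k

-- the section_priority dict literal (shared by both Pythons verbatim)
def sectionPriority : PySem.Dict String Int :=
  PySem.Dict.ofList [("1",1),("2",2),("3",3),("4",4),("5",5),("0",10),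
    ("A",100),("B",101),("C",102),("D",103),("E",104),
    ("F",105),("G",106),("H",107),("I",108),("J",109)]

-- section_priority.get(c.get('section', ''), 1000)  (the sort key in A, the priority in B)
def prioOf (c : List (String × String)) : Int :=
  sectionPriority.getD ((cget c "section").getD "") 1000

-- courses_by_same_id[course.get('same_course_id')].append(course)
def groupStep (d : PySem.Dict (Option String) (List (List (String × String))))
    (c : List (String × String)) : PySem.Dict (Option String) (List (List (String × String))) :=
  d.modify (cget c "same_course_id") [] (· ++ [c])

-- the body of A's final per-group loop (appends the chosen section to the accumulator)
def selectStep (acc : List (List (String × String)))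
    (p : Option String × List (List (String × String))) : List (List (String × String)) :=
  let cl := p.2
  if cl.length == 1 then acc ++ [PySem.List.pyGetD cl 0 []]
  else
    match cl.find? (fun c => cget c "section" == some "1") with
    | some c1 => acc ++ [c1]
    | none => acc ++ [PySem.List.pyGetD (PySem.List.sorted cl (fun c => prioOf c) false) 0 []]

def filter_course_sections (courses : List (List (String × String))) : List (List (String × String)) :=
  let active := courses.filter (fun c => !(cget c "extra_info" == some "CANCELLED"))
  let grouped := active.foldl groupStep PySem.Dict.empty
  grouped.items.foldl selectStep []

-- ===== PORT B =====
-- the body of B's single pass: keep the stored course unless this one has strictly lower priority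
def bestStep (d : PySem.Dict (Option String) (List (String × String) × Int))
    (c : List (String × String)) : PySem.Dict (Option String) (List (String × String) × Int) :=
  if cget c "extra_info" == some "CANCELLED" then d
  else
    let p := prioOf c
    let k := cget c "same_course_id"
    match d.get? k with
    | none => d.insert k (c, p)
    | some b => if p < b.2 then d.insert k (c, p) else d

def filter_course_sections_alt (courses : List (List (String × String))) : List (List (String × String)) :=
  let best := courses.foldl bestStep PySem.Dict.empty
  best.values.map (·.1)

-- ===== PRECONDITION & SPEC =====
def Spec_filter_course_sections (courses : List (List (String × String))) (out : List (List (String × String))) : Prop := out = filter_course_sections_alt courses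
instance (courses : List (List (String × String))) (out : List (List (String × String))) : Decidable (Spec_filter_course_sections courses out) := by unfold Spec_filter_course_sections; infer_instance

-- ===== CLAIM (what is proved, stated in full; the proofs are below) =====
def Claim_equal_filter_course_sections : Prop := ∀ (courses : List (List (String × String))), Dom_filter_course_sections courses → Spec_filter_course_sections courses (filter_course_sections courses)

-- ===== LEMMAS AND PROOFS =====

-- "keep the earlier course unless the new one has strictly lower priority"
def gmin (b c : List (String × String)) : List (String × String) :=
  if prioOf c < prioOf b then c else b

-- first course of minimal priority in a (nonempty) group
def fm (l : List (List (String × String))) : List (String × String) :=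
  match l with
  | [] => []
  | c :: t => t.foldl gmin c

set_option maxHeartbeats 2000000 in
lemma sp_mk : sectionPriority = PySem.Dict.mk [("1",1),("2",2),("3",3),("4",4),("5",5),("0",10),
    ("A",100),("B",101),("C",102),("D",103),("E",104),
    ("F",105),("G",106),("H",107),("I",108),("J",109)] := by decide

lemma getD_mk_of_forall (ps : List (String × Int)) (s : String) (dflt : Int) (P : Int → Prop)
    (h1 : ∀ p ∈ ps, P p.2) (h2 : P dflt) : P (((PySem.Dict.mk ps).get? s).getD dflt) := by
  induction ps with
  | nil =>
    have h0 : (PySem.Dict.mk ([] : List (String × Int))).get? s = none := PySem.Dict.get?_empty s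
    rw [h0]
    simpa using h2
  | cons p ps ih =>
    obtain ⟨k, v⟩ := p
    rw [PySem.Dict.get?_mk_cons]
    by_cases hk : (k == s) = true
    · simpa [hk] using h1 (k, v) (by simp)
    · simp only [hk, Bool.false_eq_true, if_false]
      exact ih (fun q hq => h1 q (by simp [hq]))

lemma getD_mk_eq_one_imp (ps : List (String × Int)) (s : String) (dflt : Int)
    (h1 : ∀ p ∈ ps, p.2 = 1 → p.1 = "1") (h2 : dflt ≠ 1) :
    ((PySem.Dict.mk ps).get? s).getD dflt = 1 → s = "1" := by
  induction ps with
  | nil =>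
    intro h
    have h0 : (PySem.Dict.mk ([] : List (String × Int))).get? s = none := PySem.Dict.get?_empty s
    rw [h0] at h
    simp at h
    exact absurd h h2
  | cons p ps ih =>
    obtain ⟨k, v⟩ := p
    rw [PySem.Dict.get?_mk_cons]
    by_cases hk : (k == s) = true
    · intro h
      simp only [hk, if_true, Option.getD_some] at h
      have := h1 (k, v) (by simp) h
      rw [← (beq_iff_eq).mp hk]
      exact this
    · simp only [hk, Bool.false_eq_true, if_false]
      exact ih (fun q hq hv => h1 q (by simp [hq]) hv)

lemma prioOf_ge_one (c : List (String × String)) : 1 ≤ prioOf c := by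
  unfold prioOf
  rw [PySem.Dict.getD_eq_get?_getD, sp_mk]
  exact getD_mk_of_forall _ _ _ (fun v => 1 ≤ v) (by decide) (by decide)

set_option maxHeartbeats 2000000 in
lemma prioOf_eq_one_iff (c : List (String × String)) :
    prioOf c = 1 ↔ cget c "section" = some "1" := by
  constructor
  · intro h
    unfold prioOf at h
    rw [PySem.Dict.getD_eq_get?_getD, sp_mk] at h
    have hs := getD_mk_eq_one_imp _ _ _ (by decide) (by decide) h
    rcases hcs : cget c "section" with _ | s
    · rw [hcs] at hs; simp at hs
    · rw [hcs] at hs; simp at hs; rw [hs]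
  · intro h
    unfold prioOf
    rw [h]
    decide

lemma insertBy_ne_nil (bef : List (String × String) → List (String × String) → Bool)
    (x : List (String × String)) (ys : List (List (String × String))) :
    PySem.List.insertBy bef x ys ≠ [] :=
  List.ne_nil_of_mem ((PySem.List.mem_insertBy bef x x ys).mpr (Or.inl rfl))

lemma headD_insertBy (x y : List (String × String)) (ys : List (List (String × String))) :
    (PySem.List.insertBy (fun a b => decide (prioOf a < prioOf b)) x (y :: ys)).headD []
      = gmin y x := by
  unfold gmin
  by_cases h : prioOf x < prioOf y <;> simp [PySem.List.insertBy, h]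

-- head of the stable sort's fold = left fold of gmin
lemma headD_foldl_insertBy (t : List (List (String × String)))
    (acc : List (List (String × String))) (h : acc ≠ []) :
    ((t.foldl (fun a x => PySem.List.insertBy (fun a b => decide (prioOf a < prioOf b)) x a) acc).headD [])
      = t.foldl gmin (acc.headD []) := by
  induction t generalizing acc with
  | nil => rfl
  | cons x t ih =>
    simp only [List.foldl]
    rw [ih _ (insertBy_ne_nil _ _ _)]
    obtain ⟨y, ys, rfl⟩ := List.exists_cons_of_ne_nil h
    rw [headD_insertBy]
    rfl

lemma headD_sorted (c : List (String × String)) (t : List (List (String × String))) :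
    (PySem.List.sorted (c :: t) (fun c => prioOf c) false).headD [] = t.foldl gmin c := by
  rw [PySem.List.sorted_eq_foldl_insertBy]
  simp only [List.foldl]
  rw [headD_foldl_insertBy t (PySem.List.insertBy _ c []) (insertBy_ne_nil _ _ _)]
  rfl

lemma foldl_gmin_of_prio_one (t : List (List (String × String))) (c : List (String × String))
    (h : prioOf c = 1) : t.foldl gmin c = c := by
  induction t with
  | nil => rfl
  | cons x t ih =>
    have hx := prioOf_ge_one x
    simp only [List.foldl, gmin, h]
    rw [if_neg (by omega)]
    exact ih

lemma foldl_gmin_find_one (t : List (List (String × String))) :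
    ∀ (c m : List (String × String)),
    (c :: t).find? (fun x => prioOf x == 1) = some m → t.foldl gmin c = m := by
  induction t with
  | nil =>
    intro c m h
    by_cases hc : prioOf c = 1
    · rw [List.find?_cons_of_pos (by simpa using hc)] at h
      simpa using h
    · rw [List.find?_cons_of_neg (by simpa using hc)] at h
      rw [List.find?_nil] at h
      exact absurd h (by simp)
  | cons x t ih =>
    intro c m h
    by_cases hc : prioOf c = 1
    · rw [List.find?_cons_of_pos (by simpa using hc)] at h
      obtain rfl : c = m := by simpa using h
      exact foldl_gmin_of_prio_one _ _ hc
    · rw [List.find?_cons_of_neg (by simpa using hc)] at h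
      have hcge := prioOf_ge_one c
      by_cases hx : prioOf x = 1
      · rw [List.find?_cons_of_pos (by simpa using hx)] at h
        obtain rfl : x = m := by simpa using h
        have : gmin c x = x := by unfold gmin; rw [if_pos (by omega)]
        simp only [List.foldl, this]
        exact foldl_gmin_of_prio_one _ _ hx
      · rw [List.find?_cons_of_neg (by simpa using hx)] at h
        have hg : ¬ prioOf (gmin c x) = 1 := by
          unfold gmin; split_ifs <;> assumption
        simp only [List.foldl]
        exact ih (gmin c x) m (by rw [List.find?_cons_of_neg (by simpa using hg)]; exact h)

lemma fm_append_singleton (l : List (List (String × String))) (c : List (String × String))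
    (h : l ≠ []) : fm (l ++ [c]) = gmin (fm l) c := by
  obtain ⟨c0, t, rfl⟩ := List.exists_cons_of_ne_nil h
  simp [fm, List.foldl_append]

-- A's per-group selection is the first course of minimal priority
lemma selectStep_eq (acc : List (List (String × String))) (k : Option String)
    (l : List (List (String × String))) (h : l ≠ []) :
    selectStep acc (k, l) = acc ++ [fm l] := by
  match l with
  | [] => exact absurd rfl h
  | [c] =>
    simp [selectStep, fm, pysem]
  | c1 :: c2 :: t =>
    have hlen : ((c1 :: c2 :: t).length == 1) = false := by simp
    simp only [selectStep, hlen, Bool.false_eq_true, if_false]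
    have hpred : (fun c => cget c "section" == some "1")
        = (fun x => prioOf x == 1) := by
      funext x
      by_cases hx : cget x "section" = some "1" <;>
        simp [hx, prioOf_eq_one_iff]
    rw [hpred]
    rcases hf : (c1 :: c2 :: t).find? (fun x => prioOf x == 1) with _ | m
    · -- no section-priority-1 course: sorted head
      have hnil : PySem.List.sorted (c1 :: c2 :: t) (fun c => prioOf c) false ≠ [] := by
        rw [Ne, PySem.List.sorted_eq_nil_iff]; simp
      obtain ⟨s0, st, hs⟩ := List.exists_cons_of_ne_nil hnil
      have h0 : PySem.List.pyGetD (PySem.List.sorted (c1 :: c2 :: t) (fun c => prioOf c) false) 0 []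
          = (PySem.List.sorted (c1 :: c2 :: t) (fun c => prioOf c) false).headD [] := by
        rw [hs]; simp [pysem]
      rw [h0, headD_sorted]
      rfl
    · have := foldl_gmin_find_one (c2 :: t) c1 m hf
      simp only [fm, this]

-- the invariant tying A's group dict to B's best dict
def InvAB (gd : PySem.Dict (Option String) (List (List (String × String))))
    (bd : PySem.Dict (Option String) (List (String × String) × Int)) : Prop :=
  bd.items = gd.items.map (fun p => (p.1, (fm p.2, prioOf (fm p.2))))
    ∧ gd.keys.Nodup ∧ ∀ p ∈ gd.items, p.2 ≠ []

lemma modify_eq_insert {κ ν : Type} [BEq κ] (d : PySem.Dict κ ν) (k : κ) (d0 : ν) (f : ν → ν) :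
    d.modify k d0 f = d.insert k (f (d.getD k d0)) := PySem.Dict.ext_iff.mpr rfl

lemma InvAB_step (gd : PySem.Dict (Option String) (List (List (String × String))))
    (bd : PySem.Dict (Option String) (List (String × String) × Int))
    (c : List (String × String)) (h : InvAB gd bd)
    (hc : (cget c "extra_info" == some "CANCELLED") = false) :
    InvAB (groupStep gd c) (bestStep bd c) := by
  obtain ⟨hitems, hnd, hne⟩ := h
  have hkeys : bd.keys = gd.keys := by
    simp [PySem.Dict.keys, hitems, List.map_map, Function.comp]
  have hbnd : bd.keys.Nodup := hkeys ▸ hnd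
  have hgs : groupStep gd c = gd.insert (cget c "same_course_id")
      (gd.getD (cget c "same_course_id") [] ++ [c]) := modify_eq_insert _ _ _ _
  by_cases hcon : gd.contains (cget c "same_course_id") = true
  · -- key already grouped
    obtain ⟨l, hget⟩ : ∃ l, gd.get? (cget c "same_course_id") = some l := by
      have := PySem.Dict.contains_eq_isSome_get? (d := gd) (k := cget c "same_course_id")
      rcases hg : gd.get? (cget c "same_course_id") with _ | l
      · rw [hg] at this; rw [this] at hcon; simp at hcon
      · exact ⟨l, rfl⟩
    have hgdD : gd.getD (cget c "same_course_id") [] = l :=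
      PySem.Dict.getD_of_get?_eq_some _ _ hget
    have hlmem : (cget c "same_course_id", l) ∈ gd.items :=
      PySem.Dict.mem_items_of_get?_eq_some _ hget
    have hlne : l ≠ [] := hne _ hlmem
    have hbcon : bd.contains (cget c "same_course_id") = true := by
      rw [PySem.Dict.contains_iff_mem_keys] at hcon ⊢
      rw [hkeys]; exact hcon
    have hbget : bd.get? (cget c "same_course_id") = some (fm l, prioOf (fm l)) := by
      exact PySem.Dict.get?_of_mem_items bd (by rw [hitems]; exact List.mem_map_of_mem hlmem) hbnd
    have hfm : fm (l ++ [c]) = gmin (fm l) c := fm_append_singleton _ _ hlne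
    have hbs : bestStep bd c = if prioOf c < prioOf (fm l)
        then bd.insert (cget c "same_course_id") (c, prioOf c) else bd := by
      simp only [bestStep, hc, Bool.false_eq_true, if_false, hbget]
    refine ⟨?_, ?_, ?_⟩
    · rw [hbs, hgs, hgdD]
      rw [PySem.Dict.items_insert_of_contains _ _ hcon]
      by_cases hlt : prioOf c < prioOf (fm l)
      · rw [if_pos hlt, PySem.Dict.items_insert_of_contains _ _ hbcon, hitems,
          List.map_map, List.map_map]
        apply List.map_congr_left
        intro p hp
        by_cases hpk : p.1 = cget c "same_course_id"
        · simp only [Function.comp, hpk, beq_self_eq_true, if_pos]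
          have : gmin (fm l) c = c := by unfold gmin; rw [if_pos hlt]
          simp [hfm, this]
        · simp [Function.comp, hpk]
      · rw [if_neg hlt, hitems, List.map_map]
        apply List.map_congr_left
        intro p hp
        by_cases hpk : p.1 = cget c "same_course_id"
        · have hpl : p.2 = l := by
            have h1 : gd.get? p.1 = some p.2 := by
              have : (p.1, p.2) ∈ gd.items := by simpa using hp
              exact PySem.Dict.get?_of_mem_items gd this hnd
            rw [hpk, hget] at h1
            exact (Option.some_inj.mp h1).symm
          have : gmin (fm l) c = fm l := by unfold gmin; rw [if_neg hlt]
          simp [Function.comp, hpk, hfm, this, hpl]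
        · simp [Function.comp, hpk]
    · rw [hgs]
      exact PySem.Dict.nodup_keys_insert _ _ _ hnd
    · intro p hp
      rw [hgs] at hp
      rw [PySem.Dict.mem_items_insert] at hp
      rcases hp with rfl | ⟨hp, _⟩
      · simp
      · exact hne _ hp
  · -- fresh key
    have hcon' : gd.contains (cget c "same_course_id") = false := by
      simpa using hcon
    have hgdD : gd.getD (cget c "same_course_id") [] = [] :=
      PySem.Dict.getD_of_not_contains _ _ hcon'
    have hbcon : bd.contains (cget c "same_course_id") = false := by
      rcases hb : bd.contains (cget c "same_course_id") with _ | _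
      · rfl
      · rw [PySem.Dict.contains_iff_mem_keys, hkeys, ← PySem.Dict.contains_iff_mem_keys] at hb
        rw [hb] at hcon'; simp at hcon'
    have hbget : bd.get? (cget c "same_course_id") = none := by
      rw [PySem.Dict.get?_eq_none_iff_not_mem_keys, hkeys]
      have hnc : ¬ (gd.contains (cget c "same_course_id") = true) := by simp [hcon']
      rw [PySem.Dict.contains_iff_mem_keys] at hnc
      exact hnc
    have hbs : bestStep bd c = bd.insert (cget c "same_course_id") (c, prioOf c) := by
      simp only [bestStep, hc, Bool.false_eq_true, if_false, hbget]
    refine ⟨?_, ?_, ?_⟩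
    · rw [hbs, hgs, hgdD]
      rw [PySem.Dict.items_insert_of_not_contains _ _ hcon',
        PySem.Dict.items_insert_of_not_contains _ _ hbcon, hitems, List.map_append]
      rfl
    · rw [hgs]
      exact PySem.Dict.nodup_keys_insert _ _ _ hnd
    · intro p hp
      rw [hgs, hgdD] at hp
      rw [PySem.Dict.mem_items_insert] at hp
      rcases hp with rfl | ⟨hp, _⟩
      · simp
      · exact hne _ hp

lemma InvAB_foldl (xs : List (List (String × String)))
    (gd : PySem.Dict (Option String) (List (List (String × String))))
    (bd : PySem.Dict (Option String) (List (String × String) × Int))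
    (h : InvAB gd bd)
    (hx : ∀ c ∈ xs, (cget c "extra_info" == some "CANCELLED") = false) :
    InvAB (xs.foldl groupStep gd) (xs.foldl bestStep bd) := by
  induction xs generalizing gd bd with
  | nil => exact h
  | cons x xs ih =>
    simp only [List.foldl]
    exact ih _ _ (InvAB_step _ _ _ h (hx x (by simp)))
      (fun c hc => hx c (by simp [hc]))

-- B's fold skips cancelled courses, so it equals the fold over A's filtered list
lemma foldl_bestStep_filter (courses : List (List (String × String)))
    (d : PySem.Dict (Option String) (List (String × String) × Int)) :
    (courses.filter (fun c => !(cget c "extra_info" == some "CANCELLED"))).foldl bestStep d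
      = courses.foldl bestStep d := by
  rw [List.foldl_filter]
  apply PySem.List.foldl_congr_mem
  intro d' c _
  by_cases hcan : (cget c "extra_info" == some "CANCELLED") = true
  · simp [hcan, bestStep]
  · simp [hcan]

-- ===== VERDICT (by name: the statement is the Claim_ definition above) =====
theorem filter_course_sections_spec : Claim_equal_filter_course_sections := by
  intro courses _
  unfold Spec_filter_course_sections filter_course_sections filter_course_sections_alt
  rw [← foldl_bestStep_filter]
  have hinv : InvAB
      ((courses.filter (fun c => !(cget c "extra_info" == some "CANCELLED"))).foldl groupStep PySem.Dict.empty)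
      ((courses.filter (fun c => !(cget c "extra_info" == some "CANCELLED"))).foldl bestStep PySem.Dict.empty) := by
    apply InvAB_foldl
    · exact ⟨rfl, PySem.Dict.nodup_keys_empty, by simp [PySem.Dict.empty]⟩
    · intro c hc
      have := List.of_mem_filter hc
      simpa using this
  obtain ⟨hitems, _, hne⟩ := hinv
  set gd := (courses.filter (fun c => !(cget c "extra_info" == some "CANCELLED"))).foldl groupStep PySem.Dict.empty
  set bd := (courses.filter (fun c => !(cget c "extra_info" == some "CANCELLED"))).foldl bestStep PySem.Dict.empty
  have hA : gd.items.foldl selectStep [] = gd.items.map (fun p => fm p.2) := by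
    rw [PySem.List.foldl_congr_mem gd.items selectStep
      (fun acc p => acc ++ [fm p.2]) [] (by
        intro acc p hp
        obtain ⟨k, l⟩ := p
        exact selectStep_eq acc k l (hne _ hp))]
    simpa using PySem.List.foldl_append_singleton_eq_map (fun p => fm p.2) gd.items []
  rw [hA]
  simp only [PySem.Dict.values, hitems, List.map_map]
  rfl
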